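-- pv_equiv track=rewrite | github.com/edallal/The-Riddler | 2021-05-14/FindWinner.py | DeterminePlacementForRoundOfN
-- ===== SOURCE A (Python) =====
-- def DeterminePlacementForRoundOfN(N, V_prev):
--     V = [[0 for j in range(21)] for i in range(N)]
--     V[0][20] = N # The player that starts with 20 is eliminated and finishes Nth
--     for p in range(1, N):
--         V[p][20] = V_prev[p-1][0] # The other players move on to the next round, finishing in the order that has been determined in V_prev
--     for j in range(19, 0, -1): # iterate from 19 down to 1
--         best_move = 0
--         min_val = N+1
--         # find move which minimizes finishing rank
--         for k in range(1, 5):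
--             if j + k > 20:
--                 break
--             if V[N-1][j+k] < min_val:
--                 best_move = j+k
--                 min_val = V[N-1][j+k]
--         for p in range(N):
--             V[p][j] = V[(p - 1) % N][best_move]
--     # Starting player is required to pick 1
--     for p in range(N):
--         V[p][0] = V[(p - 1) % N][1]
--     return V
-- ===== SOURCE B (Python) =====
-- def DeterminePlacementForRoundOfN(N, V_prev):
--     # Rotation-count reformulation: every DP column is either all zeros or a
--     # cyclic rotation of the rightmost column, so track one Option[int] per column.
--     base = [N] + [row[0] for row in V_prev[:N - 1]]
--
--     def top(r):  # value at row N-1 of a column with rotation count r (None = zero column)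
--         return 0 if r is None else base[(N - 1 - r) % N]
--
--     reps = [0]  # reps[i] is the rotation count of column (current lowest column + i)
--     for _ in range(19):  # produce columns 19 down to 1
--         found = False
--         best = None
--         mv = N + 1
--         for r in reps[:4]:
--             v = top(r)
--             if v < mv:
--                 found = True
--                 best = r
--                 mv = v
--         reps.insert(0, best + 1 if found and best is not None else None)
--     r1 = reps[0]
--     reps.insert(0, None if r1 is None else r1 + 1)  # forced move 1 from column 0
--     return [[0 if r is None else base[(p - r) % N] for r in reps] for p in range(N)]
-- ===== Notes on version B (the rewrite author's own statement) =====
-- stated objective: alternative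
-- what changed: A fills the whole N x 21 table in place column by column; B observes that every DP column is either all zeros or a cyclic rotation of the rightmost column, so it tracks one Option[rotation-count] per column (a 21-entry list built right-to-left over a length-N base vector) and materialises the grid only at the end.
import Mathlib
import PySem

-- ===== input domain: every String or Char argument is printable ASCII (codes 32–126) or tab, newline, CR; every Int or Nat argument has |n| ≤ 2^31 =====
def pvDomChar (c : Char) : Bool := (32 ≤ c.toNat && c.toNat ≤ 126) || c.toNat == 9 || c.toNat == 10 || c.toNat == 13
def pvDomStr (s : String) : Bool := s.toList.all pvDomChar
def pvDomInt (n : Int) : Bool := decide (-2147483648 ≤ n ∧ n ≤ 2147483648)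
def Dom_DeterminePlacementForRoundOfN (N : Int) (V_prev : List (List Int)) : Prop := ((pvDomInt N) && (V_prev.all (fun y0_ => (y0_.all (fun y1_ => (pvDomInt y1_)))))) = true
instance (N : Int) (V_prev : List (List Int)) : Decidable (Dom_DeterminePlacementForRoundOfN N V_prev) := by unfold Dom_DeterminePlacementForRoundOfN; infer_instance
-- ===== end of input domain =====

-- B replaces A's in-place N×21 table fill by tracking one rotation count per column
-- (every DP column is all zeros or a cyclic rotation of the rightmost column); objective: alternative decomposition.

-- ===== PORT A =====
-- V[i][j] read (indices are nonnegative and in range on every admitted input)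
def pvGet2 (V : List (List Int)) (i j : Int) : Int :=
  PySem.List.pyGetD (PySem.List.pyGetD V i []) j 0

-- V[i][j] = x
def pvSet2 (V : List (List Int)) (i j : Int) (x : Int) : List (List Int) :=
  PySem.List.pySetD V i (PySem.List.pySetD (PySem.List.pyGetD V i []) j x)

-- the inner 'for k in range(1,5)' with its break, carrying (best_move, min_val)
def pvKloop (V : List (List Int)) (N j k best mv : Int) : Int × Int :=
  if 4 < k then (best, mv)
  else if 20 < j + k then (best, mv)
  else
    let v := pvGet2 V (N - 1) (j + k)
    if v < mv then pvKloop V N j (k + 1) (j + k) v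
    else pvKloop V N j (k + 1) best mv
termination_by (5 - k).toNat
decreasing_by all_goals omega

def DeterminePlacementForRoundOfN (N : Int) (V_prev : List (List Int)) : List (List Int) :=
  let V0 := List.replicate N.toNat (List.replicate 21 (0 : Int))
  let V1 := pvSet2 V0 0 20 N
  let V2 := (PySem.List.pyRange 1 N 1).foldl
      (fun W p => pvSet2 W p 20 (pvGet2 V_prev (p - 1) 0)) V1
  let V3 := (PySem.List.pyRange 19 0 (-1)).foldl
      (fun W j =>
        let bm := pvKloop W N j 1 0 (N + 1)
        (PySem.List.pyRange 0 N 1).foldl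
          (fun W' p => pvSet2 W' p j (pvGet2 W' (PySem.Int.mod (p - 1) N) bm.1)) W) V2
  (PySem.List.pyRange 0 N 1).foldl
    (fun W p => pvSet2 W p 0 (pvGet2 W (PySem.Int.mod (p - 1) N) 1)) V3

-- ===== PORT B =====
-- base = [N] + [row[0] for row in V_prev[:N-1]]
def pvBase (N : Int) (V_prev : List (List Int)) : List Int :=
  N :: (V_prev.take (N - 1).toNat).map (fun row => PySem.List.pyGetD row 0 0)

-- entry at row p of a column with rotation count r (none = all-zero column)
def pvCol (N : Int) (base : List Int) (r : Option Int) (p : Int) : Int :=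
  match r with
  | none => 0
  | some t => PySem.List.pyGetD base (PySem.Int.mod (p - t) N) 0

-- top(r): value at row N-1
def pvTop (N : Int) (base : List Int) (r : Option Int) : Int :=
  match r with
  | none => 0
  | some t => PySem.List.pyGetD base (PySem.Int.mod (N - 1 - t) N) 0

-- the body of Source B's 'for r in reps[:4]' loop
def pvScanStep (N : Int) (base : List Int) (st : Bool × Option Int × Int) (r : Option Int) :
    Bool × Option Int × Int :=
  let v := pvTop N base r
  if v < st.2.2 then (true, r, v) else st

-- one column selection: scan the (up to) four candidate rotation counts
def pvScan (N : Int) (base : List Int) (cands : List (Option Int)) : Option Int :=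
  let st := cands.foldl (pvScanStep N base) (false, none, N + 1)
  if st.1 then (match st.2.1 with | some b => some (b + 1) | none => none) else none

-- 'None if r is None else r + 1'
def pvShift (r : Option Int) : Option Int :=
  match r with
  | none => none
  | some t => some (t + 1)

-- the 'for _ in range(19)' loop prepending one new rotation count per column
def pvBloop (N : Int) (base : List Int) : Nat → List (Option Int) → List (Option Int)
  | 0, reps => reps
  | m + 1, reps => pvBloop N base m (pvScan N base (reps.take 4) :: reps)

def DeterminePlacementForRoundOfN_alt (N : Int) (V_prev : List (List Int)) : List (List Int) :=
  let base := pvBase N V_prev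
  let reps0 := pvBloop N base 19 [some 0]
  let reps := pvShift (reps0.headD none) :: reps0
  (PySem.List.pyRange 0 N 1).map (fun p => reps.map (fun r => pvCol N base r p))

-- ===== PRECONDITION & SPEC =====
-- Pre_ excludes exactly the inputs where Python A raises: N < 1 (V[0][20] IndexError),
-- fewer than N-1 rows in V_prev, or an empty row among the first N-1 (row[0] IndexError).
def Pre_DeterminePlacementForRoundOfN (N : Int) (V_prev : List (List Int)) : Prop :=
  1 ≤ N ∧ (N - 1).toNat ≤ V_prev.length ∧ ∀ row ∈ V_prev.take (N - 1).toNat, row ≠ []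
instance (N : Int) (V_prev : List (List Int)) : Decidable (Pre_DeterminePlacementForRoundOfN N V_prev) := by
  unfold Pre_DeterminePlacementForRoundOfN; infer_instance

def pvWitness_DeterminePlacementForRoundOfN : Int × List (List Int) := (2, [[3]])

def Spec_DeterminePlacementForRoundOfN (N : Int) (V_prev : List (List Int)) (out : List (List Int)) : Prop := out = DeterminePlacementForRoundOfN_alt N V_prev
instance (N : Int) (V_prev : List (List Int)) (out : List (List Int)) : Decidable (Spec_DeterminePlacementForRoundOfN N V_prev out) := by unfold Spec_DeterminePlacementForRoundOfN; infer_instance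

-- ===== CLAIM (what is proved, stated in full; the proofs are below) =====
def Claim_equal_DeterminePlacementForRoundOfN : Prop := ∀ (N : Int) (V_prev : List (List Int)), Dom_DeterminePlacementForRoundOfN N V_prev → Pre_DeterminePlacementForRoundOfN N V_prev → Spec_DeterminePlacementForRoundOfN N V_prev (DeterminePlacementForRoundOfN N V_prev)

-- ===== LEMMAS AND PROOFS =====

-- proof-side model: the list of rotation counts after m prepending steps
def repsM (N : Int) (base : List Int) : Nat → List (Option Int)
  | 0 => [some 0]
  | m + 1 => pvScan N base ((repsM N base m).take 4) :: repsM N base m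

theorem length_repsM (N : Int) (base : List Int) (m : Nat) : (repsM N base m).length = m + 1 := by
  induction m with
  | zero => rfl
  | succ m ih => simp [repsM, ih]

theorem bloop_repsM (N : Int) (base : List Int) :
    ∀ (k m : Nat), pvBloop N base k (repsM N base m) = repsM N base (m + k) := by
  intro k
  induction k with
  | zero => intro m; rfl
  | succ k ih =>
      intro m
      show pvBloop N base k (pvScan N base ((repsM N base m).take 4) :: repsM N base m) = _
      have : pvScan N base ((repsM N base m).take 4) :: repsM N base m = repsM N base (m + 1) := rfl
      rw [this, ih]
      congr 1
      omega

theorem bloop19 (N : Int) (base : List Int) :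
    pvBloop N base 19 [some 0] = repsM N base 19 := by
  have h0 : ([some 0] : List (Option Int)) = repsM N base 0 := rfl
  rw [h0, bloop_repsM]

def pvShape (N : Int) (V : List (List Int)) : Prop :=
  V.length = N.toNat ∧ ∀ row ∈ V, row.length = 21

-- the loop invariant: columns right of the frontier hold their rotated values, the rest are 0
def pvInv (N : Int) (base : List Int) (m : Nat) (V : List (List Int)) : Prop :=
  pvShape N V ∧
  ∀ p c : Int, 0 ≤ p → p < N → 0 ≤ c → c ≤ 20 →
    pvGet2 V p c =
      if 20 - (m : Int) ≤ c then
        pvCol N base ((repsM N base m).getD (c - (20 - (m : Int))).toNat none) p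
      else 0

theorem mod_id (N : Int) (hN : 0 < N) {p : Int} (h0 : 0 ≤ p) (h1 : p < N) :
    PySem.Int.mod p N = p := by
  rw [PySem.Int.mod_eq_emod_of_pos hN]
  exact Int.emod_eq_of_lt h0 h1

theorem mod_bounds (N : Int) (hN : 0 < N) (a : Int) :
    0 ≤ PySem.Int.mod a N ∧ PySem.Int.mod a N < N :=
  ⟨PySem.Int.mod_nonneg a hN, PySem.Int.mod_lt a hN⟩

theorem col_shift (N : Int) (hN : 0 < N) (base : List Int) (r : Option Int) (p : Int) :
    pvCol N base r (PySem.Int.mod (p - 1) N) = pvCol N base (pvShift r) p := by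
  cases r with
  | none => rfl
  | some t =>
      show PySem.List.pyGetD base (PySem.Int.mod (PySem.Int.mod (p - 1) N - t) N) 0 = _
      have : PySem.Int.mod (PySem.Int.mod (p - 1) N - t) N = PySem.Int.mod (p - (t + 1)) N := by
        rw [PySem.Int.mod_eq_emod_of_pos hN, PySem.Int.mod_eq_emod_of_pos hN,
            PySem.Int.mod_eq_emod_of_pos hN, Int.emod_sub_emod]
        ring_nf
      rw [this]
      rfl

theorem top_col (N : Int) (base : List Int) (r : Option Int) :
    pvTop N base r = pvCol N base r (N - 1) := by
  cases r <;> rfl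

theorem set2_eq (N : Int) (V : List (List Int)) (hs : pvShape N V) {i c : Int}
    (hi0 : 0 ≤ i) (hi : i < N) (hc0 : 0 ≤ c) (x : Int) :
    pvSet2 V i c x = V.set i.toNat (V[i.toNat]'(by obtain ⟨hl, _⟩ := hs; omega) |>.set c.toNat x) := by
  obtain ⟨hl, hr⟩ := hs
  have h1 : PySem.List.pyGetD V i [] = V[i.toNat]'(by omega) :=
    PySem.List.pyGetD_eq_getElem V [] hi0 (by omega)
  have hsetgen : ∀ r : List Int, PySem.List.pySetD V i r = V.set i.toNat r := by
    intro r
    conv_lhs => rw [(by omega : i = ((i.toNat : Nat) : Int)), PySem.List.pySetD_natCast]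
  have hsetrow : ∀ row : List Int, PySem.List.pySetD row c x = row.set c.toNat x := by
    intro row
    conv_lhs => rw [(by omega : c = ((c.toNat : Nat) : Int)), PySem.List.pySetD_natCast]
  rw [pvSet2, h1, hsetrow, hsetgen]

theorem shape_set2 (N : Int) (V : List (List Int)) (hs : pvShape N V) {i c : Int}
    (hi0 : 0 ≤ i) (hi : i < N) (hc0 : 0 ≤ c) (x : Int) : pvShape N (pvSet2 V i c x) := by
  rw [set2_eq N V hs hi0 hi hc0 x]
  obtain ⟨hl, hr⟩ := hs
  refine ⟨by simpa using hl, ?_⟩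
  intro row hrow
  rcases List.mem_or_eq_of_mem_set hrow with h | h
  · exact hr row h
  · subst h
    simpa using hr _ (List.getElem_mem (by omega))

theorem get2_set2 (N : Int) (V : List (List Int)) (hs : pvShape N V)
    {i c p q : Int} (hi0 : 0 ≤ i) (hi : i < N) (hc0 : 0 ≤ c) (hc : c ≤ 20)
    (hp0 : 0 ≤ p) (hp : p < N) (hq0 : 0 ≤ q) (hq : q ≤ 20) (x : Int) :
    pvGet2 (pvSet2 V i c x) p q = if p = i ∧ q = c then x else pvGet2 V p q := by
  obtain ⟨hl, hr⟩ := hs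
  have hiN : i.toNat < V.length := by omega
  have hpN : p.toNat < V.length := by omega
  have hrowi : (V[i.toNat]).length = 21 := hr _ (List.getElem_mem hiN)
  have hrowp : (V[p.toNat]).length = 21 := hr _ (List.getElem_mem hpN)
  rw [set2_eq N V ⟨hl, hr⟩ hi0 hi hc0 x, pvGet2, pvGet2]
  have houter : PySem.List.pyGetD (V.set i.toNat (V[i.toNat].set c.toNat x)) p [] =
      if p.toNat = i.toNat then V[i.toNat].set c.toNat x else V[p.toNat] := by
    rw [PySem.List.pyGetD_eq_getElem _ [] hp0 (by simp; omega)]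
    by_cases h : p.toNat = i.toNat
    · simp [h]
    · rw [List.getElem_set_ne (by omega)]
      simp [h]
  rw [houter]
  have hinner : PySem.List.pyGetD V p [] = V[p.toNat] :=
    PySem.List.pyGetD_eq_getElem V [] hp0 (by omega)
  rw [hinner]
  by_cases hpi : p = i
  · subst hpi
    rw [if_pos rfl]
    rw [PySem.List.pyGetD_eq_getElem _ 0 hq0 (by rw [List.length_set]; omega)]
    rw [List.getElem_set]
    by_cases hqc : q = c
    · subst hqc
      rw [if_pos rfl, if_pos ⟨rfl, rfl⟩]
    · rw [if_neg (by omega : ¬ c.toNat = q.toNat), if_neg (by omega : ¬ (p = p ∧ q = c))]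
      rw [PySem.List.pyGetD_eq_getElem _ 0 hq0 (by omega)]
  · rw [if_neg (by omega : ¬ p.toNat = i.toNat), if_neg (by omega : ¬ (p = i ∧ q = c))]

-- parallel induction: A's k-loop computes the same selection as B's candidate scan
theorem scanGen (N : Int) (hN : 0 < N) (base : List Int) (V : List (List Int)) (j : Int) :
    ∀ (cands : List (Option Int)) (k best : Int) (st : Bool × Option Int × Int) (mv : Int),
    1 ≤ k →
    (k + (cands.length : Int) = min 5 (21 - j)) →
    (∀ (i : Nat), i < cands.length → ∀ q : Int, 0 ≤ q → q < N →
        pvGet2 V q (j + k + (i : Int)) = pvCol N base (cands.getD i none) q) →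
    (mv = st.2.2) →
    (∀ q : Int, 0 ≤ q → q < N →
        pvGet2 V q best = pvCol N base (if st.1 then st.2.1 else none) q) →
    (best = 0 ∨ (j < best ∧ best ≤ 20)) →
    (∀ q : Int, 0 ≤ q → q < N →
        pvGet2 V q (pvKloop V N j k best mv).1
          = pvCol N base
              (if (cands.foldl (pvScanStep N base) st).1
               then (cands.foldl (pvScanStep N base) st).2.1 else none) q)
      ∧ ((pvKloop V N j k best mv).1 = 0 ∨
          (j < (pvKloop V N j k best mv).1 ∧ (pvKloop V N j k best mv).1 ≤ 20)) := by
  intro cands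
  induction cands with
  | nil =>
      intro k best st mv h1 hlen hcol hmv hbest hrange
      have hstop : pvKloop V N j k best mv = (best, mv) := by
        rw [pvKloop]
        have h45 : 4 < k ∨ 20 < j + k := by simp at hlen; omega
        split_ifs with ha hb
        · rfl
        · rfl
        · omega
      simp only [List.foldl_nil]
      rw [hstop]
      exact ⟨hbest, hrange⟩
  | cons c rest ih =>
      intro k best st mv h1 hlen hcol hmv hbest hrange
      simp only [List.length_cons] at hlen
      have hk4 : ¬ 4 < k := by omega
      have hjk : ¬ 20 < j + k := by omega
      have hlen' : (k + 1) + (rest.length : Int) = min 5 (21 - j) := by push_cast at hlen ⊢; omega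
      have hv : pvGet2 V (N - 1) (j + k) = pvTop N base c := by
        have h0 := hcol 0 (by simp) (N - 1) (by omega) (by omega)
        rw [top_col]
        simpa using h0
      have hunfold : pvKloop V N j k best mv =
          if pvGet2 V (N - 1) (j + k) < mv
          then pvKloop V N j (k + 1) (j + k) (pvGet2 V (N - 1) (j + k))
          else pvKloop V N j (k + 1) best mv := by
        rw [pvKloop, if_neg hk4, if_neg hjk]
      have hcol' : ∀ (i : Nat), i < rest.length → ∀ q : Int, 0 ≤ q → q < N →
          pvGet2 V q (j + (k + 1) + (i : Int)) = pvCol N base (rest.getD i none) q := by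
        intro i hi q hq0 hq1
        have h2 := hcol (i + 1) (by simp; omega) q hq0 hq1
        have hidx : j + (k + 1) + (i : Int) = j + k + ((i + 1 : Nat) : Int) := by push_cast; ring
        rw [hidx]
        simpa using h2
      rw [List.foldl_cons]
      by_cases hlt : pvTop N base c < st.2.2
      · have hlt' : pvGet2 V (N - 1) (j + k) < mv := by rw [hv, hmv]; exact hlt
        have hstep : pvScanStep N base st c = (true, c, pvTop N base c) := by
          simp [pvScanStep, hlt]
        rw [hunfold, if_pos hlt', hstep]
        refine ih (k + 1) (j + k) (true, c, pvTop N base c) (pvGet2 V (N - 1) (j + k))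
          (by omega) hlen' hcol' (by simpa using hv) ?_ (Or.inr ⟨by omega, by omega⟩)
        intro q hq0 hq1
        have h0 := hcol 0 (by simp) q hq0 hq1
        simpa using h0
      · have hlt' : ¬ pvGet2 V (N - 1) (j + k) < mv := by rw [hv, hmv]; exact hlt
        have hstep : pvScanStep N base st c = st := by
          simp [pvScanStep, hlt]
        rw [hunfold, if_neg hlt', hstep]
        exact ih (k + 1) best st mv (by omega) hlen' hcol' hmv hbest hrange

theorem scan_shift (N : Int) (base : List Int) (cands : List (Option Int)) :
    pvScan N base cands =
      pvShift (if (cands.foldl (pvScanStep N base) (false, none, N + 1)).1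
               then (cands.foldl (pvScanStep N base) (false, none, N + 1)).2.1 else none) := by
  show (if (cands.foldl (pvScanStep N base) (false, none, N + 1)).1 then _ else _) = _
  rcases h : cands.foldl (pvScanStep N base) (false, none, N + 1) with ⟨found, bestR, mv⟩
  cases found <;> cases bestR <;> rfl

-- one pass of 'for p in range(N): V[p][j] = V[(p-1)%N][best]' (reads a column other than j)
theorem writeLoop (N : Int) (hN : 0 < N) (V : List (List Int)) (j best : Int)
    (hj0 : 0 ≤ j) (hj : j ≤ 20) (hb0 : 0 ≤ best) (hb : best ≤ 20) (hne : best ≠ j)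
    (hs : pvShape N V) :
    ∀ t : Nat, (t : Int) ≤ N →
      pvShape N ((PySem.List.pyRange 0 (t : Int) 1).foldl
          (fun W p => pvSet2 W p j (pvGet2 W (PySem.Int.mod (p - 1) N) best)) V) ∧
      ∀ p c : Int, 0 ≤ p → p < N → 0 ≤ c → c ≤ 20 →
        pvGet2 ((PySem.List.pyRange 0 (t : Int) 1).foldl
            (fun W p => pvSet2 W p j (pvGet2 W (PySem.Int.mod (p - 1) N) best)) V) p c =
          if p < (t : Int) ∧ c = j then pvGet2 V (PySem.Int.mod (p - 1) N) best
          else pvGet2 V p c := by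
  intro t
  induction t with
  | zero =>
      intro _
      rw [(by norm_num : ((0 : Nat) : Int) = 0), PySem.List.pyRange_one_eq_nil (le_refl 0)]
      refine ⟨hs, ?_⟩
      intro p c hp0 hp hc0 hc
      rw [if_neg (by omega)]
      rfl
  | succ t ih =>
      intro ht
      have ht' : (t : Int) ≤ N := by push_cast at ht ⊢; omega
      have htN : (t : Int) < N := by push_cast at ht; omega
      obtain ⟨hWs, hWc⟩ := ih ht'
      have hrw : PySem.List.pyRange 0 ((t + 1 : Nat) : Int) 1 =
          PySem.List.pyRange 0 (t : Int) 1 ++ [(t : Int)] := by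
        push_cast
        exact PySem.List.pyRange_one_succ_right (by positivity)
      rw [hrw, List.foldl_append, List.foldl_cons, List.foldl_nil]
      have hmb := mod_bounds N hN ((t : Int) - 1)
      have hread : pvGet2 ((PySem.List.pyRange 0 (t : Int) 1).foldl
            (fun W p => pvSet2 W p j (pvGet2 W (PySem.Int.mod (p - 1) N) best)) V)
            (PySem.Int.mod ((t : Int) - 1) N) best =
          pvGet2 V (PySem.Int.mod ((t : Int) - 1) N) best := by
        rw [hWc _ _ hmb.1 hmb.2 hb0 hb, if_neg (by tauto)]
      constructor
      · exact shape_set2 N _ hWs (by positivity) htN hj0 _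
      · intro p c hp0 hp hc0 hc
        rw [get2_set2 N _ hWs (by positivity) htN hj0 hj hp0 hp hc0 hc, hread]
        by_cases h1 : p = (t : Int) ∧ c = j
        · rw [if_pos h1, if_pos (by push_cast; omega), h1.1]
        · rw [if_neg h1, hWc p c hp0 hp hc0 hc]
          by_cases h2 : p < (t : Int) ∧ c = j
          · rw [if_pos h2, if_pos (by push_cast; omega)]
          · rw [if_neg h2, if_neg (by push_cast; omega)]

-- one iteration of the outer j-loop preserves the invariant
theorem stepInv (N : Int) (hN : 0 < N) (base : List Int) (m : Nat) (hm : m ≤ 18)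
    (V : List (List Int)) (hInv : pvInv N base m V) :
    pvInv N base (m + 1)
      ((PySem.List.pyRange 0 N 1).foldl
        (fun W' p => pvSet2 W' p (19 - (m : Int))
          (pvGet2 W' (PySem.Int.mod (p - 1) N)
            (pvKloop V N (19 - (m : Int)) 1 0 (N + 1)).1)) V) := by
  obtain ⟨hs, hc⟩ := hInv
  have hlenr : (repsM N base m).length = m + 1 := length_repsM N base m
  have hlenc : ((repsM N base m).take 4).length = min 4 (m + 1) := by
    simp [List.length_take, hlenr]
  have hmain := scanGen N hN base V (19 - (m : Int)) ((repsM N base m).take 4) 1 0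
      (false, none, N + 1) (N + 1) (le_refl 1)
      (by rw [hlenc]; push_cast; omega)
      (by
        intro i hi q hq0 hq1
        rw [hlenc] at hi
        have hcval := hc q (19 - (m : Int) + 1 + (i : Int)) hq0 hq1 (by omega) (by omega)
        rw [if_pos (by omega)] at hcval
        rw [hcval]
        congr 1
        have hidx : ((19 - (m : Int) + 1 + (i : Int)) - (20 - (m : Int))).toNat = i := by omega
        rw [hidx]
        have hil : i < (repsM N base m).length := by omega
        have hit : i < ((repsM N base m).take 4).length := by omega
        rw [List.getD_eq_getElem _ _ hit, List.getD_eq_getElem _ _ hil, List.getElem_take])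
      rfl
      (by
        intro q hq0 hq1
        have hcval := hc q 0 hq0 hq1 (le_refl 0) (by omega)
        rw [if_neg (by omega)] at hcval
        exact hcval)
      (Or.inl rfl)
  obtain ⟨hsel, hrange⟩ := hmain
  have hb0 : 0 ≤ (pvKloop V N (19 - (m : Int)) 1 0 (N + 1)).1 := by rcases hrange with h | h <;> omega
  have hb20 : (pvKloop V N (19 - (m : Int)) 1 0 (N + 1)).1 ≤ 20 := by rcases hrange with h | h <;> omega
  have hne : (pvKloop V N (19 - (m : Int)) 1 0 (N + 1)).1 ≠ 19 - (m : Int) := by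
    rcases hrange with h | h <;> omega
  have hval : ∀ p : Int, 0 ≤ p → p < N →
      pvGet2 V (PySem.Int.mod (p - 1) N) (pvKloop V N (19 - (m : Int)) 1 0 (N + 1)).1 =
        pvCol N base (pvScan N base ((repsM N base m).take 4)) p := by
    intro p hp0 hp1
    rw [scan_shift, ← col_shift N hN base _ p]
    exact hsel _ (mod_bounds N hN (p - 1)).1 (mod_bounds N hN (p - 1)).2
  have hNN : ((N.toNat : Nat) : Int) = N := by omega
  obtain ⟨hWs, hWc⟩ := writeLoop N hN V (19 - (m : Int)) _
      (by omega) (by omega) hb0 hb20 hne hs N.toNat (by omega)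
  rw [hNN] at hWs hWc
  refine ⟨hWs, ?_⟩
  intro p c hp0 hp1 hc0 hc20
  rw [hWc p c hp0 hp1 hc0 hc20]
  by_cases h1 : c = 19 - (m : Int)
  · rw [if_pos ⟨hp1, h1⟩, hval p hp0 hp1, if_pos (by push_cast; omega)]
    have : ((c - (20 - ((m + 1 : Nat) : Int))).toNat) = 0 := by push_cast; omega
    rw [this]
    rfl
  · rw [if_neg (by tauto), hc p c hp0 hp1 hc0 hc20]
    by_cases h2 : 20 - (m : Int) ≤ c
    · rw [if_pos h2, if_pos (by push_cast; omega)]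
      have hidx : ((c - (20 - ((m + 1 : Nat) : Int))).toNat) =
          ((c - (20 - (m : Int))).toNat) + 1 := by push_cast; omega
      rw [hidx]
      rfl
    · rw [if_neg h2, if_neg (by push_cast; omega)]

-- the 'for p in range(1, N)' initialisation writes (independent of the table being built)
theorem writeExt (N : Int) (V : List (List Int)) (f : Int → Int) (hs : pvShape N V) :
    ∀ t : Nat, 1 + (t : Int) ≤ N →
      pvShape N ((PySem.List.pyRange 1 (1 + (t : Int)) 1).foldl
          (fun W p => pvSet2 W p 20 (f p)) V) ∧
      ∀ p c : Int, 0 ≤ p → p < N → 0 ≤ c → c ≤ 20 →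
        pvGet2 ((PySem.List.pyRange 1 (1 + (t : Int)) 1).foldl
            (fun W p => pvSet2 W p 20 (f p)) V) p c =
          if 1 ≤ p ∧ p < 1 + (t : Int) ∧ c = 20 then f p else pvGet2 V p c := by
  intro t
  induction t with
  | zero =>
      intro _
      rw [(by norm_num : (1 : Int) + ((0 : Nat) : Int) = 1), PySem.List.pyRange_one_eq_nil (le_refl 1)]
      refine ⟨hs, ?_⟩
      intro p c hp0 hp hc0 hc
      rw [if_neg (by omega)]
      rfl
  | succ t ih =>
      intro ht
      have ht' : 1 + (t : Int) ≤ N := by push_cast at ht ⊢; omega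
      obtain ⟨hWs, hWc⟩ := ih ht'
      have hrw : PySem.List.pyRange 1 (1 + ((t + 1 : Nat) : Int)) 1 =
          PySem.List.pyRange 1 (1 + (t : Int)) 1 ++ [1 + (t : Int)] := by
        push_cast
        rw [(by ring : (1 : Int) + ((t : Int) + 1) = (1 + (t : Int)) + 1)]
        exact PySem.List.pyRange_one_succ_right (by omega)
      rw [hrw, List.foldl_append, List.foldl_cons, List.foldl_nil]
      constructor
      · exact shape_set2 N _ hWs (by omega) (by push_cast at ht; omega) (by norm_num) _
      · intro p c hp0 hp hc0 hc
        rw [get2_set2 N _ hWs (by omega) (by push_cast at ht; omega) (by norm_num)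
            (by norm_num) hp0 hp hc0 hc]
        by_cases h1 : p = 1 + (t : Int) ∧ c = 20
        · rw [if_pos h1, if_pos (by push_cast; omega), h1.1]
        · rw [if_neg h1, hWc p c hp0 hp hc0 hc]
          by_cases h2 : 1 ≤ p ∧ p < 1 + (t : Int) ∧ c = 20
          · rw [if_pos h2, if_pos (by push_cast; omega)]
          · rw [if_neg h2, if_neg (by push_cast; omega)]

-- the invariant holds after the column-20 initialisation
theorem initInv (N : Int) (V_prev : List (List Int)) (hN : 0 < N)
    (hlen : (N - 1).toNat ≤ V_prev.length) :
    pvInv N (pvBase N V_prev) 0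
      ((PySem.List.pyRange 1 N 1).foldl
        (fun W p => pvSet2 W p 20 (pvGet2 V_prev (p - 1) 0))
        (pvSet2 (List.replicate N.toNat (List.replicate 21 0)) 0 20 N)) := by
  have hs0 : pvShape N (List.replicate N.toNat (List.replicate 21 (0 : Int))) := by
    refine ⟨by simp, ?_⟩
    intro row hrow
    rw [List.eq_of_mem_replicate hrow]
    simp
  have hget0 : ∀ p c : Int, 0 ≤ p → p < N → 0 ≤ c → c ≤ 20 →
      pvGet2 (List.replicate N.toNat (List.replicate 21 (0 : Int))) p c = 0 := by
    intro p c hp0 hp hc0 hc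
    rw [pvGet2, PySem.List.pyGetD_eq_getElem _ [] hp0 (by simp; omega)]
    rw [List.getElem_replicate, PySem.List.pyGetD_eq_getElem _ 0 hc0 (by simp; omega)]
    rw [List.getElem_replicate]
  have hs1 : pvShape N (pvSet2 (List.replicate N.toNat (List.replicate 21 0)) 0 20 N) :=
    shape_set2 N _ hs0 (le_refl 0) hN (by norm_num) N
  have hget1 : ∀ p c : Int, 0 ≤ p → p < N → 0 ≤ c → c ≤ 20 →
      pvGet2 (pvSet2 (List.replicate N.toNat (List.replicate 21 0)) 0 20 N) p c =
        if p = 0 ∧ c = 20 then N else 0 := by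
    intro p c hp0 hp hc0 hc
    rw [get2_set2 N _ hs0 (le_refl 0) hN (by norm_num) (by norm_num) hp0 hp hc0 hc]
    by_cases h : p = 0 ∧ c = 20
    · rw [if_pos h, if_pos h]
    · rw [if_neg h, if_neg h, hget0 p c hp0 hp hc0 hc]
  have hNt : 1 + (((N - 1).toNat : Nat) : Int) = N := by omega
  obtain ⟨hWs, hWc⟩ := writeExt N _ (fun p => pvGet2 V_prev (p - 1) 0) hs1 (N - 1).toNat
    (by omega)
  rw [hNt] at hWs hWc
  refine ⟨hWs, ?_⟩
  intro p c hp0 hp1 hc0 hc20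
  rw [hWc p c hp0 hp1 hc0 hc20]
  have hbl : (pvBase N V_prev).length = N.toNat := by
    simp only [pvBase, List.length_cons, List.length_map, List.length_take]
    rw [Nat.min_eq_left hlen]
    omega
  by_cases hcc : c = 20
  · subst hcc
    have hRidx : (((20 : Int) - (20 - ((0 : Nat) : Int))).toNat) = 0 := by norm_num
    by_cases hp : p = 0
    · subst hp
      rw [if_neg (by omega), if_pos (by norm_num), hRidx,
          hget1 0 20 (le_refl 0) hp1 (by norm_num) (le_refl 20), if_pos ⟨rfl, rfl⟩]
      show (N : Int) = PySem.List.pyGetD (pvBase N V_prev) (PySem.Int.mod (0 - 0) N) 0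
      rw [(by norm_num : (0 : Int) - 0 = 0), mod_id N hN (le_refl 0) hN]
      rw [pvBase, PySem.List.pyGetD_zero_cons]
    · rw [if_pos ⟨by omega, hp1, rfl⟩, if_pos (by norm_num), hRidx]
      show pvGet2 V_prev (p - 1) 0 = PySem.List.pyGetD (pvBase N V_prev) (PySem.Int.mod (p - 0) N) 0
      rw [sub_zero, mod_id N hN hp0 hp1]
      symm
      have hvp : p.toNat - 1 < V_prev.length := by omega
      have h1 : PySem.List.pyGetD (pvBase N V_prev) p 0 = (pvBase N V_prev).getD p.toNat 0 := by
        conv_lhs => rw [(by omega : p = ((p.toNat : Nat) : Int))]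
        rw [PySem.List.pyGetD_natCast]
      have h2 : (pvBase N V_prev).getD p.toNat 0 =
          ((V_prev.take (N - 1).toNat).map (fun row => PySem.List.pyGetD row 0 0)).getD
            (p.toNat - 1) 0 := by
        rw [pvBase]
        conv_lhs => rw [(by omega : p.toNat = (p.toNat - 1) + 1)]
        rfl
      have hlm : p.toNat - 1 <
          ((V_prev.take (N - 1).toNat).map (fun row => PySem.List.pyGetD row 0 0)).length := by
        simp only [List.length_map, List.length_take]
        rw [Nat.min_eq_left hlen]
        omega
      have h3 : ((V_prev.take (N - 1).toNat).map (fun row => PySem.List.pyGetD row 0 0)).getD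
            (p.toNat - 1) 0 = PySem.List.pyGetD (V_prev[p.toNat - 1]'hvp) 0 0 := by
        rw [List.getD_eq_getElem _ _ hlm, List.getElem_map, List.getElem_take]
      rw [h1, h2, h3, pvGet2, PySem.List.pyGetD_eq_getElem _ [] (by omega) (by omega)]
      congr 2
      omega
  · rw [if_neg (by tauto), if_neg (by omega), hget1 p c hp0 hp1 hc0 hc20,
        if_neg (by omega)]

-- chaining the 19 outer iterations
theorem chainInv (N : Int) (hN : 0 < N) (base : List Int) (V2 : List (List Int))
    (h0 : pvInv N base 0 V2) :
    ∀ T : Nat, T ≤ 19 →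
      pvInv N base T
        (((List.range T).map (fun kk : Nat => (19 : Int) - (kk : Int))).foldl
          (fun W j =>
            (PySem.List.pyRange 0 N 1).foldl
              (fun W' p => pvSet2 W' p j
                (pvGet2 W' (PySem.Int.mod (p - 1) N) (pvKloop W N j 1 0 (N + 1)).1)) W) V2) := by
  intro T
  induction T with
  | zero => intro _; simpa using h0
  | succ T ih =>
      intro hT
      rw [List.range_succ, List.map_append, List.foldl_append]
      simp only [List.map_cons, List.map_nil, List.foldl_cons, List.foldl_nil]
      exact stepInv N hN base T (by omega) _ (ih (by omega))

theorem headD_getD {α : Type} (l : List α) (d : α) : l.headD d = l.getD 0 d := by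
  cases l <;> rfl

theorem DeterminePlacementForRoundOfN_spec : Claim_equal_DeterminePlacementForRoundOfN := by
  intro N V_prev hDom hPre
  obtain ⟨hN1, hlen, hrows⟩ := hPre
  have hN : 0 < N := by omega
  unfold Spec_DeterminePlacementForRoundOfN
  have hV2 := initInv N V_prev hN hlen
  have hInv3 := chainInv N hN (pvBase N V_prev) ((PySem.List.pyRange 1 N 1).foldl (fun W p => pvSet2 W p 20 (pvGet2 V_prev (p - 1) 0)) (pvSet2 (List.replicate N.toNat (List.replicate 21 0)) 0 20 N)) hV2 19 (le_refl 19)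
  obtain ⟨hs3, hc3⟩ := hInv3
  have hr1get : ∀ q : Int, 0 ≤ q → q < N →
      pvGet2 (((List.range 19).map (fun kk : Nat => (19 : Int) - (kk : Int))).foldl (fun W j => (PySem.List.pyRange 0 N 1).foldl (fun W' p => pvSet2 W' p j (pvGet2 W' (PySem.Int.mod (p - 1) N) (pvKloop W N j 1 0 (N + 1)).1)) W) ((PySem.List.pyRange 1 N 1).foldl (fun W p => pvSet2 W p 20 (pvGet2 V_prev (p - 1) 0)) (pvSet2 (List.replicate N.toNat (List.replicate 21 0)) 0 20 N))) q 1 =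
        pvCol N (pvBase N V_prev) ((repsM N (pvBase N V_prev) 19).getD 0 none) q := by
    intro q hq0 hq1
    have h := hc3 q 1 hq0 hq1 (by norm_num) (by norm_num)
    rw [if_pos (by norm_num)] at h
    simpa using h
  obtain ⟨hs4, hc4⟩ := writeLoop N hN (((List.range 19).map (fun kk : Nat => (19 : Int) - (kk : Int))).foldl (fun W j => (PySem.List.pyRange 0 N 1).foldl (fun W' p => pvSet2 W' p j (pvGet2 W' (PySem.Int.mod (p - 1) N) (pvKloop W N j 1 0 (N + 1)).1)) W) ((PySem.List.pyRange 1 N 1).foldl (fun W p => pvSet2 W p 20 (pvGet2 V_prev (p - 1) 0)) (pvSet2 (List.replicate N.toNat (List.replicate 21 0)) 0 20 N))) 0 1 (le_refl 0) (by norm_num) (by norm_num)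
    (by norm_num) (by norm_num) hs3 N.toNat (by omega)
  have hNN : ((N.toNat : Nat) : Int) = N := by omega
  rw [hNN] at hs4 hc4
  have hA : ∀ p c : Int, 0 ≤ p → p < N → 0 ≤ c → c ≤ 20 →
      pvGet2 ((PySem.List.pyRange 0 N 1).foldl (fun W p => pvSet2 W p 0 (pvGet2 W (PySem.Int.mod (p - 1) N) 1)) (((List.range 19).map (fun kk : Nat => (19 : Int) - (kk : Int))).foldl (fun W j => (PySem.List.pyRange 0 N 1).foldl (fun W' p => pvSet2 W' p j (pvGet2 W' (PySem.Int.mod (p - 1) N) (pvKloop W N j 1 0 (N + 1)).1)) W) ((PySem.List.pyRange 1 N 1).foldl (fun W p => pvSet2 W p 20 (pvGet2 V_prev (p - 1) 0)) (pvSet2 (List.replicate N.toNat (List.replicate 21 0)) 0 20 N)))) p c = pvCol N (pvBase N V_prev) ((pvShift ((repsM N (pvBase N V_prev) 19).headD none) :: repsM N (pvBase N V_prev) 19).getD c.toNat none) p := by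
    intro p c hp0 hp1 hc0 hc20
    rw [hc4 p c hp0 hp1 hc0 hc20]
    by_cases hcz : c = 0
    · subst hcz
      rw [if_pos ⟨hp1, rfl⟩,
        hr1get _ (mod_bounds N hN (p - 1)).1 (mod_bounds N hN (p - 1)).2,
        col_shift N hN, headD_getD]
      rfl
    · rw [if_neg (by tauto), hc3 p c hp0 hp1 hc0 hc20, if_pos (by push_cast; omega)]
      have hidx : c.toNat = ((c - (20 - ((19 : Nat) : Int))).toNat) + 1 := by push_cast; omega
      rw [hidx]
      rfl
  have hAeq : DeterminePlacementForRoundOfN N V_prev = ((PySem.List.pyRange 0 N 1).foldl (fun W p => pvSet2 W p 0 (pvGet2 W (PySem.Int.mod (p - 1) N) 1)) (((List.range 19).map (fun kk : Nat => (19 : Int) - (kk : Int))).foldl (fun W j => (PySem.List.pyRange 0 N 1).foldl (fun W' p => pvSet2 W' p j (pvGet2 W' (PySem.Int.mod (p - 1) N) (pvKloop W N j 1 0 (N + 1)).1)) W) ((PySem.List.pyRange 1 N 1).foldl (fun W p => pvSet2 W p 20 (pvGet2 V_prev (p - 1) 0)) (pvSet2 (List.replicate N.toNat (List.replicate 21 0))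 0 20 N)))) := by
    show (PySem.List.pyRange 0 N 1).foldl
        (fun W p => pvSet2 W p 0 (pvGet2 W (PySem.Int.mod (p - 1) N) 1))
        ((PySem.List.pyRange 19 0 (-1)).foldl
          (fun W j =>
            let bm := pvKloop W N j 1 0 (N + 1)
            (PySem.List.pyRange 0 N 1).foldl
              (fun W' p => pvSet2 W' p j (pvGet2 W' (PySem.Int.mod (p - 1) N) bm.1)) W)
          ((PySem.List.pyRange 1 N 1).foldl (fun W p => pvSet2 W p 20 (pvGet2 V_prev (p - 1) 0)) (pvSet2 (List.replicate N.toNat (List.replicate 21 0)) 0 20 N))) = _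
    rw [PySem.List.pyRange_neg_one]
    rfl
  have hBeq : DeterminePlacementForRoundOfN_alt N V_prev =
      (PySem.List.pyRange 0 N 1).map
        (fun p => (pvShift ((repsM N (pvBase N V_prev) 19).headD none) :: repsM N (pvBase N V_prev) 19).map (fun r => pvCol N (pvBase N V_prev) r p)) := by
    show (PySem.List.pyRange 0 N 1).map
        (fun p => (pvShift ((pvBloop N (pvBase N V_prev) 19 [some 0]).headD none) ::
          pvBloop N (pvBase N V_prev) 19 [some 0]).map
            (fun r => pvCol N (pvBase N V_prev) r p)) = _
    rw [bloop19]
  rw [hAeq, hBeq]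
  apply List.ext_getElem
  · rw [hs4.1, List.length_map, PySem.List.length_pyRange_one]
    omega
  · intro pN h1 h2
    have hpN : (pN : Int) < N := by
      have hl := hs4.1
      omega
    rw [List.getElem_map, PySem.List.getElem_pyRange_one, zero_add]
    have hrowlen : (((PySem.List.pyRange 0 N 1).foldl (fun W p => pvSet2 W p 0 (pvGet2 W (PySem.Int.mod (p - 1) N) 1)) (((List.range 19).map (fun kk : Nat => (19 : Int) - (kk : Int))).foldl (fun W j => (PySem.List.pyRange 0 N 1).foldl (fun W' p => pvSet2 W' p j (pvGet2 W' (PySem.Int.mod (p - 1) N) (pvKloop W N j 1 0 (N + 1)).1)) W) ((PySem.List.pyRange 1 N 1).foldl (fun W p => pvSet2 W p 20 (pvGet2 V_prev (p - 1) 0)) (pvSet2 (List.replicate N.toNat (List.replicate 21 0)) 0 20 N))))[pN]'h1).length = 21 := hs4.2 _ (List.getElem_mem h1)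
    apply List.ext_getElem
    · rw [hrowlen, List.length_map, List.length_cons, length_repsM]
    · intro cN hc1 hc2
      have hcN : cN < 21 := by omega
      rw [List.getElem_map]
      have hLHS : (((PySem.List.pyRange 0 N 1).foldl (fun W p => pvSet2 W p 0 (pvGet2 W (PySem.Int.mod (p - 1) N) 1)) (((List.range 19).map (fun kk : Nat => (19 : Int) - (kk : Int))).foldl (fun W j => (PySem.List.pyRange 0 N 1).foldl (fun W' p => pvSet2 W' p j (pvGet2 W' (PySem.Int.mod (p - 1) N) (pvKloop W N j 1 0 (N + 1)).1)) W) ((PySem.List.pyRange 1 N 1).foldl (fun W p => pvSet2 W p 20 (pvGet2 V_prev (p - 1) 0)) (pvSet2 (List.replicate N.toNat (List.replicate 21 0)) 0 20 N))))[pN]'h1)[cN]'hc1 = pvGet2 ((PySem.List.pyRange 0 N 1).foldl (fun W p => pvSet2 W p 0 (pvGet2 W (PySem.Int.mod (p - 1) N) 1)) (((List.range 19).map (fun kk : Nat => (19 : Int) - (kk : Int))).foldl (fun W j => (PySem.List.pyRange 0 N 1).foldl (fun W' p => pvSet2 W' p j (pvGet2 W' (PySem.Int.mod (p - 1) N) (pvKloop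 W N j 1 0 (N + 1)).1)) W) ((PySem.List.pyRange 1 N 1).foldl (fun W p => pvSet2 W p 20 (pvGet2 V_prev (p - 1) 0)) (pvSet2 (List.replicate N.toNat (List.replicate 21 0)) 0 20 N)))) (pN : Int) (cN : Int) := by
        rw [pvGet2]
        have hin : PySem.List.pyGetD ((PySem.List.pyRange 0 N 1).foldl (fun W p => pvSet2 W p 0 (pvGet2 W (PySem.Int.mod (p - 1) N) 1)) (((List.range 19).map (fun kk : Nat => (19 : Int) - (kk : Int))).foldl (fun W j => (PySem.List.pyRange 0 N 1).foldl (fun W' p => pvSet2 W' p j (pvGet2 W' (PySem.Int.mod (p - 1) N) (pvKloop W N j 1 0 (N + 1)).1)) W) ((PySem.List.pyRange 1 N 1).foldl (fun W p => pvSet2 W p 20 (pvGet2 V_prev (p - 1) 0)) (pvSet2 (List.replicate N.toNat (List.replicate 21 0)) 0 20 N)))) ((pN : Nat) : Int) [] = ((PySem.List.pyRange 0 N 1).foldl (fun W p => pvSet2 W p 0 (pvGet2 W (PySem.Int.mod (p - 1) N) 1)) (((List.range 19).map (fun kk : Nat => (19 : Int) - (kk : Int))).foldl (fun W j => (PySem.List.pyRange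 0 N 1).foldl (fun W' p => pvSet2 W' p j (pvGet2 W' (PySem.Int.mod (p - 1) N) (pvKloop W N j 1 0 (N + 1)).1)) W) ((PySem.List.pyRange 1 N 1).foldl (fun W p => pvSet2 W p 20 (pvGet2 V_prev (p - 1) 0)) (pvSet2 (List.replicate N.toNat (List.replicate 21 0)) 0 20 N)))).getD pN [] :=
          PySem.List.pyGetD_natCast _ pN []
        rw [hin, PySem.List.pyGetD_natCast, List.getD_eq_getElem _ _ h1,
          List.getD_eq_getElem _ _ hc1]
      rw [hLHS, hA (pN : Int) (cN : Int) (by positivity) hpN (by positivity) (by omega)]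
      congr 1
      have hct : ((cN : Int)).toNat = cN := by omega
      rw [hct]
      rw [List.getD_eq_getElem _ _ (by simp [length_repsM]; omega)]
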